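-- pv_equiv track=rewrite | github.com/pupixel-ai/benchmark_chat | backend/query_v1/materializer.py | _photo_to_events
-- ===== SOURCE A (Python) =====
-- from typing import Any, Dict, Iterable, List, Optional, Sequence, Tuple
--
-- def _photo_to_events(event_photo_rows: Sequence[Dict[str, Any]]) -> Dict[str, List[str]]:
--     mapping: Dict[str, List[str]] = {}
--     for row in list(event_photo_rows or []):
--         photo_id = str(row.get("photo_id") or "").strip()
--         event_id = str(row.get("event_id") or "").strip()
--         if not photo_id or not event_id:
--             continue
--         mapping.setdefault(photo_id, []).append(event_id)
--     return mapping
-- ===== SOURCE B (Python) =====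
-- from typing import Any, Dict, List, Sequence
--
--
-- def _photo_to_events(event_photo_rows: Sequence[Dict[str, Any]]) -> Dict[str, List[str]]:
--     pairs = []
--     for row in list(event_photo_rows or []):
--         photo_id = str(row.get("photo_id") or "").strip()
--         event_id = str(row.get("event_id") or "").strip()
--         if photo_id and event_id:
--             pairs.append((photo_id, event_id))
--     keys = dict.fromkeys(p for p, _ in pairs)
--     return {p: [e for q, e in pairs if q == p] for p in keys}
-- ===== Notes on version B (the rewrite author's own statement) =====
-- stated objective: alternative
-- what changed: Instead of A's single pass that mutates a dict via setdefault/append, B first collects the cleaned (photo_id, event_id) pairs, dedups the photo_ids in first-occurrence order, and builds each dict entry in one comprehension that filters the pair list per key.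
import Mathlib
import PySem

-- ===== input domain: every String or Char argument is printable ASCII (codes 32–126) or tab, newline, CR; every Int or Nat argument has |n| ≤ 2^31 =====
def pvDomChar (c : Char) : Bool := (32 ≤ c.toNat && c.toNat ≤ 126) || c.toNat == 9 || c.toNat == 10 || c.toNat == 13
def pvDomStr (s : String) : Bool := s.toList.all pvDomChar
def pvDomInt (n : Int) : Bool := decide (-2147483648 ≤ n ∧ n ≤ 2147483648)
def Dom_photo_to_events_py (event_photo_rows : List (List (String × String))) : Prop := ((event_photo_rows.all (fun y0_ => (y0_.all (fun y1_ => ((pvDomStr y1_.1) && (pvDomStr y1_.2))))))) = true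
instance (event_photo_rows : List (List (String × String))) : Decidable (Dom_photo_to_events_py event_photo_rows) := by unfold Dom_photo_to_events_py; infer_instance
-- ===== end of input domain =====

-- B replaces A's single setdefault/append dict-mutation pass by: collect cleaned pairs,
-- dedup the photo_ids (first occurrence), and build each entry by filtering the pair list
-- per key (objective: alternative decomposition; equivalence of RETURN values is proved).

-- ===== PORT A =====
-- photo_id = str(row.get("photo_id") or "").strip()  (row.get on the assoc list = first match;
-- 'or ""' turns None and "" into "", str() is the identity on str)
def pvCleanField (row : List (String × String)) (k : String) : String :=
  PySem.Str.strip (((PySem.Dict.mk row).get? k).getD "")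

def photo_to_events_py (event_photo_rows : List (List (String × String))) : List (String × List String) :=
  (event_photo_rows.foldl
    (fun mapping row =>
      let photo_id := pvCleanField row "photo_id"
      let event_id := pvCleanField row "event_id"
      if photo_id = "" ∨ event_id = "" then mapping
      else mapping.modify photo_id [] (fun v => v ++ [event_id]))
    PySem.Dict.empty).items

-- ===== PORT B =====
def pvPairs (event_photo_rows : List (List (String × String))) : List (String × String) :=
  event_photo_rows.foldl
    (fun pairs row =>
      let photo_id := pvCleanField row "photo_id"
      let event_id := pvCleanField row "event_id"
      if photo_id = "" ∨ event_id = "" then pairs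
      else pairs ++ [(photo_id, event_id)])
    []

-- dict.fromkeys(...) in order = PySem.List.dedup; the comprehension's keys are distinct,
-- so the resulting dict's items are exactly this map.
def photo_to_events_py_alt (event_photo_rows : List (List (String × String))) : List (String × List String) :=
  let pairs := pvPairs event_photo_rows
  (PySem.List.dedup (pairs.map (·.1))).map
    (fun p => (p, (pairs.filter (fun q => q.1 == p)).map (·.2)))

-- ===== PRECONDITION & SPEC =====
def Spec_photo_to_events_py (event_photo_rows : List (List (String × String))) (out : List (String × List String)) : Prop := out = photo_to_events_py_alt event_photo_rows
instance (event_photo_rows : List (List (String × String))) (out : List (String × List String)) : Decidable (Spec_photo_to_events_py event_photo_rows out) := by unfold Spec_photo_to_events_py; infer_instance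

-- ===== CLAIM (what is proved, stated in full; the proofs are below) =====
def Claim_equal_photo_to_events_py : Prop := ∀ (event_photo_rows : List (List (String × String))), Dom_photo_to_events_py event_photo_rows → Spec_photo_to_events_py event_photo_rows (photo_to_events_py event_photo_rows)

-- ===== LEMMAS AND PROOFS =====

-- named forms of the two ports' loop bodies (definitionally equal to them)
def pvStepA (mapping : PySem.Dict String (List String)) (row : List (String × String)) :
    PySem.Dict String (List String) :=
  if pvCleanField row "photo_id" = "" ∨ pvCleanField row "event_id" = "" then mapping
  else mapping.modify (pvCleanField row "photo_id") [] (fun v => v ++ [pvCleanField row "event_id"])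

def pvStepB (pairs : List (String × String)) (row : List (String × String)) :
    List (String × String) :=
  if pvCleanField row "photo_id" = "" ∨ pvCleanField row "event_id" = "" then pairs
  else pairs ++ [(pvCleanField row "photo_id", pvCleanField row "event_id")]

def pvGroup (mapping : PySem.Dict String (List String)) (p : String × String) :
    PySem.Dict String (List String) :=
  mapping.modify p.1 [] (fun v => v ++ [p.2])

theorem pvPairs_eq (rows : List (List (String × String))) :
    pvPairs rows = rows.foldl pvStepB [] := rfl

-- the pair-collecting fold appends to its accumulator
theorem pvPairs_acc (rows : List (List (String × String))) (acc : List (String × String)) :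
    rows.foldl pvStepB acc = acc ++ rows.foldl pvStepB [] := by
  induction rows generalizing acc with
  | nil => simp
  | cons row rows ih =>
    simp only [List.foldl_cons]
    rw [ih, ih (pvStepB [] row)]
    by_cases h : pvCleanField row "photo_id" = "" ∨ pvCleanField row "event_id" = "" <;>
      simp [pvStepB, h]

-- A's fold over the rows is the grouping fold over the cleaned pair list.
theorem pvAfold_eq (rows : List (List (String × String))) (d : PySem.Dict String (List String)) :
    rows.foldl pvStepA d = (rows.foldl pvStepB []).foldl pvGroup d := by
  induction rows generalizing d with
  | nil => rfl
  | cons row rows ih =>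
    simp only [List.foldl_cons]
    rw [ih]
    by_cases h : pvCleanField row "photo_id" = "" ∨ pvCleanField row "event_id" = ""
    · simp [pvStepA, pvStepB, h]
    · rw [pvPairs_acc rows (pvStepB [] row)]
      simp [pvStepA, pvStepB, pvGroup, h]

-- ===== VERDICT (by name: the statement is the Claim_ definition above) =====
theorem photo_to_events_py_spec : Claim_equal_photo_to_events_py := by
  intro rows _
  unfold Spec_photo_to_events_py
  show (rows.foldl pvStepA PySem.Dict.empty).items = photo_to_events_py_alt rows
  rw [pvAfold_eq]
  unfold photo_to_events_py_alt
  rw [pvPairs_eq]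
  set pairs := rows.foldl pvStepB [] with hp
  have hg : pvGroup = fun (d : PySem.Dict String (List String)) (x : String × String) =>
      d.modify (Prod.fst x) [] ((fun (d : PySem.Dict String (List String))
        (x : String × String) (v : List String) => v ++ [x.2]) d x) := rfl
  have hnd : (pairs.foldl pvGroup PySem.Dict.empty).keys.Nodup := by
    rw [hg]
    exact PySem.Dict.nodup_keys_foldl_modify_key pairs Prod.fst []
      (fun d x v => v ++ [x.2]) PySem.Dict.empty PySem.Dict.nodup_keys_empty
  rw [PySem.Dict.items_eq_map_keys _ hnd []]
  have hkeys : (pairs.foldl pvGroup PySem.Dict.empty).keys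
      = PySem.Set.ofList (pairs.map Prod.fst) := by
    rw [hg, PySem.Dict.keys_foldl_modify_key]
    simp [PySem.Dict.keys_empty, PySem.Set.update_nil_left]
  rw [hkeys]
  simp only [PySem.List.dedup_eq_ofList]
  apply List.map_congr_left
  intro k _
  have hG : ∀ (d : PySem.Dict String (List String)),
      (pairs.foldl pvGroup d).getD k [] = d.getD k []
        ++ (pairs.filter (fun p => p.1 == k)).map (·.2) := by
    intro d
    have := PySem.Dict.getD_foldl_modify_append (l := pairs) (d := d) (c := k)
    simpa [pvGroup] using this
  rw [hG PySem.Dict.empty]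
  simp [PySem.Dict.getD_empty]
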